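-- pv_equiv track=rewrite | github.com/shanewilkins/roadmap | roadmap/adapters/persistence/persistence.py | _needs_quoting
-- ===== SOURCE A (Python) =====
-- def _needs_quoting(value: str) -> bool:
--     """Check if value contains special YAML characters requiring quoting.
--
--     Args:
--         value: Value to check
--
--     Returns:
--         True if value needs quoting
--     """
--     special_chars = [
--         ":",
--         "#",
--         "@",
--         "`",
--         "|",
--         ">",
--         "*",
--         "&",
--         "!",
--         "%",
--         "{",
--         "}",
--         "[",
--         "]",
--     ]
--     return any(char in value for char in special_chars)
-- ===== SOURCE B (Python) =====
-- def _needs_quoting(value: str) -> bool: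
--     special = frozenset(":#@`|>*&!%{}[]")
--     return bool(set(value) & special)
-- ===== Notes on version B (the rewrite author's own statement) =====
-- stated objective: idiomatic
-- what changed: B deduplicates the string into a set of characters once and tests emptiness of its intersection with a frozenset of the 14 special characters, instead of A's loop over the 14 specials each doing a substring scan.
import Mathlib
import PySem

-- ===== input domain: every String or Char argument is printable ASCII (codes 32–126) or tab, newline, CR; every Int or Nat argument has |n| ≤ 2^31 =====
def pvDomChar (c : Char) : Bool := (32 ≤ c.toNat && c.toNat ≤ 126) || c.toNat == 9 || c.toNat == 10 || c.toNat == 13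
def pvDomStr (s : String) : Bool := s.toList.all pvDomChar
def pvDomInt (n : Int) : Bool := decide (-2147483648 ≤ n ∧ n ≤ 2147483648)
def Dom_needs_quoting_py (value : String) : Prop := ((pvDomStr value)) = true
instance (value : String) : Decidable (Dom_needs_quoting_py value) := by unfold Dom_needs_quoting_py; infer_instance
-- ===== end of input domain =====

-- B replaces A's 14 substring scans by one set of the string's characters intersected with the special-character set (idiomatic; not measured faster).
-- ===== PORT A =====
-- Port of A: loop over the 14 special strings, each tested with substring 'in'.
def needs_quoting_py (value : String) : Bool :=
  let special_chars : List String :=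
    [":", "#", "@", "`", "|", ">", "*", "&", "!", "%", "{", "}", "[", "]"]
  special_chars.any (fun ch => PySem.Str.isIn ch value)

-- ===== PORT B =====
-- Port of B: the set of the string's characters, intersected with the special set.
def needs_quoting_py_alt (value : String) : Bool :=
  let special : PySem.Set Char :=
    PySem.Set.ofList [':', '#', '@', '`', '|', '>', '*', '&', '!', '%', '{', '}', '[', ']']
  let chars : PySem.Set Char := PySem.Set.ofList value.toList
  !(PySem.Set.inter chars special).isEmpty

-- ===== PRECONDITION & SPEC =====
def Spec_needs_quoting_py (value : String) (out : Bool) : Prop := out = needs_quoting_py_alt value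
instance (value : String) (out : Bool) : Decidable (Spec_needs_quoting_py value out) := by unfold Spec_needs_quoting_py; infer_instance

-- ===== CLAIM (what is proved, stated in full; the proofs are below) =====
def Claim_equal_needs_quoting_py : Prop := ∀ (value : String), Dom_needs_quoting_py value → Spec_needs_quoting_py value (needs_quoting_py value)

-- ===== LEMMAS AND PROOFS =====

-- ===== VERDICT (by name: the statement is the Claim_ definition above) =====
theorem needs_quoting_py_spec : Claim_equal_needs_quoting_py := by
  intro value _
  unfold Spec_needs_quoting_py needs_quoting_py needs_quoting_py_alt
  rw [Bool.eq_iff_iff]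
  simp only [List.any_eq_true, Bool.not_eq_true', List.isEmpty_eq_false_iff_exists_mem,
    PySem.Set.mem_inter, PySem.Set.mem_ofList]
  constructor
  · rintro ⟨s, hs, hin⟩
    rw [PySem.Str.isIn_iff_infix] at hin
    fin_cases hs <;>
      [exact ⟨':', hin.subset (by decide), by decide⟩;
        exact ⟨'#', hin.subset (by decide), by decide⟩;
        exact ⟨'@', hin.subset (by decide), by decide⟩;
        exact ⟨'`', hin.subset (by decide), by decide⟩;
        exact ⟨'|', hin.subset (by decide), by decide⟩;
        exact ⟨'>', hin.subset (by decide), by decide⟩;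
        exact ⟨'*', hin.subset (by decide), by decide⟩;
        exact ⟨'&', hin.subset (by decide), by decide⟩;
        exact ⟨'!', hin.subset (by decide), by decide⟩;
        exact ⟨'%', hin.subset (by decide), by decide⟩;
        exact ⟨'{', hin.subset (by decide), by decide⟩;
        exact ⟨'}', hin.subset (by decide), by decide⟩;
        exact ⟨'[', hin.subset (by decide), by decide⟩;
        exact ⟨']', hin.subset (by decide), by decide⟩]
  · rintro ⟨c, hval, hsp⟩
    refine ⟨String.ofList [c], ?_, ?_⟩
    · fin_cases hsp <;> decide
    · rw [PySem.Str.isIn_iff_infix]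
      simpa using (List.singleton_infix_iff c value.toList).mpr hval
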